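-- pv_equiv track=rewrite | github.com/crowdalert/ocsf-parquet | generate.py | get_basic_type
-- ===== SOURCE A (Python) =====
-- from typing import Dict, List, Any, Set
--
-- def get_basic_type(type_name: str, types: Dict[str, Any]) -> str:
--     """Convert basic OCSF types to Parquet type definitions."""
--     if not type_name:
--         return "BYTE_ARRAY {} (STRING)"
--
--     basic_types = {
--         "boolean_t": "BOOLEAN {}",
--         "long_t": "INT64 {} (INTEGER(64, true))",
--         "integer_t": "INT32 {} (INTEGER(32, true))",
--         "float_t": "FLOAT {}",
--         "json_t": "BYTE_ARRAY {} (JSON)",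
--         "timestamp_t": "INT64 {} (TIMESTAMP(MILLIS, false))",
--     }
--
--     if type_name in basic_types:
--         return basic_types[type_name]
--
--     # Get the type definition from schema
--     type_info = types.get(type_name, {})
--     if type_info.get("type"):
--         return get_basic_type(type_info["type"], types)
--
--     return "BYTE_ARRAY {} (STRING)"
-- ===== SOURCE B (Python) =====
-- _BASIC_TYPES = {
--     "boolean_t": "BOOLEAN {}",
--     "long_t": "INT64 {} (INTEGER(64, true))",
--     "integer_t": "INT32 {} (INTEGER(32, true))",
--     "float_t": "FLOAT {}",
--     "json_t": "BYTE_ARRAY {} (JSON)",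
--     "timestamp_t": "INT64 {} (TIMESTAMP(MILLIS, false))",
-- }
--
-- _DEFAULT = "BYTE_ARRAY {} (STRING)"
--
--
-- def get_basic_type(type_name, types):
--     """Convert basic OCSF types to Parquet type definitions."""
--     # Precompute the truthy alias edges of the schema once.
--     nxt = {k: v.get("type") for k, v in types.items() if v.get("type")}
--     # Iterate the one-step resolution to a fixed point: terminal names (empty,
--     # basic, or alias-less) are fixed points, and any terminating alias chain
--     # is shorter than len(types) + 1 steps.
--     name = type_name
--     for _ in range(len(types) + 1):
--         name = name if (not name or name in _BASIC_TYPES) else nxt.get(name, name)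
--     return _BASIC_TYPES.get(name, _DEFAULT)
-- ===== Notes on version B (the rewrite author's own statement) =====
-- stated objective: alternative
-- what changed: Replaces A's recursion (which re-reads the schema and renders at every level) with three stages: a dict comprehension extracting the truthy alias edges once, a bounded fixed-point iteration of the one-step resolution, and a single defaulted table lookup. Pre_ excludes cyclic alias chains, on which A raises RecursionError and B's bounded loop returns the STRING default.
import Mathlib
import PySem

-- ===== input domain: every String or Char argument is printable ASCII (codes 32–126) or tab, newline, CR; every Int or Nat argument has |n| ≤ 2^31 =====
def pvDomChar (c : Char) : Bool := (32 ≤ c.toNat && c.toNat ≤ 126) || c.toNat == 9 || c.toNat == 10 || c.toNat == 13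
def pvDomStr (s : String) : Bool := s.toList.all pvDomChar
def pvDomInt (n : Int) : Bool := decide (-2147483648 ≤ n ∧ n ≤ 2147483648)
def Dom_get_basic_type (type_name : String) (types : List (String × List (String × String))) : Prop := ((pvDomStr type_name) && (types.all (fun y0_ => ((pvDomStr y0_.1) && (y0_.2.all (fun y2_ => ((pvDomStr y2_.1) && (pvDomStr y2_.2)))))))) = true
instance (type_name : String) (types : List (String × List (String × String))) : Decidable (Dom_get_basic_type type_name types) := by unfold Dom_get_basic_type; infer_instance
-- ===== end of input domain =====

-- B replaces A's recursion (which re-checks the schema dict and renders at every level)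
-- by three stages: a dict comprehension extracting the truthy alias edges once, a
-- fixed-count iteration of the one-step resolution to its fixed point, and a single
-- defaulted table lookup. Return value only; no mutation.

-- The `basic_types` table both Pythons carry.
def pvBasicTypes : PySem.Dict String String := PySem.Dict.ofList
  [("boolean_t", "BOOLEAN {}"),
   ("long_t", "INT64 {} (INTEGER(64, true))"),
   ("integer_t", "INT32 {} (INTEGER(32, true))"),
   ("float_t", "FLOAT {}"),
   ("json_t", "BYTE_ARRAY {} (JSON)"),
   ("timestamp_t", "INT64 {} (TIMESTAMP(MILLIS, false))")]

-- ===== PORT A =====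
-- A recurses along the alias chain; Pre_ (the chain reaches a terminal) bounds the
-- recursion depth by the number of distinct schema keys, so this fuel never runs out
-- under Pre_.
def getBasicTypeFuel : Nat → String → List (String × List (String × String)) → String
  | 0, _, _ => "BYTE_ARRAY {} (STRING)"  -- unreachable under Pre_
  | fuel + 1, type_name, types =>
    if type_name = "" then "BYTE_ARRAY {} (STRING)"
    else
      match PySem.Dict.get? pvBasicTypes type_name with
      | some v => v
      | none =>
        let type_info := PySem.Dict.getD (PySem.Dict.ofList types) type_name []
        match PySem.Dict.get? (PySem.Dict.ofList type_info) "type" with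
        | some t => if t ≠ "" then getBasicTypeFuel fuel t types else "BYTE_ARRAY {} (STRING)"
        | none => "BYTE_ARRAY {} (STRING)"

def get_basic_type (type_name : String) (types : List (String × List (String × String))) : String :=
  getBasicTypeFuel (types.length + 1) type_name types

-- ===== PORT B =====
-- Source B stage 1: the dict comprehension {k: v.get("type") for k, v in types.items() if v.get("type")}.
def altEdges (types : List (String × List (String × String))) : PySem.Dict String String :=
  PySem.Dict.ofList ((PySem.Dict.ofList types).items.filterMap
    (fun kv => match PySem.Dict.get? (PySem.Dict.ofList kv.2) "type" with
      | some t => if t = "" then none else some (kv.1, t)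
      | none => none))

-- Source B loop body: name if (not name or name in _BASIC_TYPES) else nxt.get(name, name).
def altStep (nxt : PySem.Dict String String) (name : String) : String :=
  if name = "" || PySem.Dict.contains pvBasicTypes name then name
  else PySem.Dict.getD nxt name name

-- Source B stages 2 and 3: iterate the step len(types)+1 times, then one defaulted lookup.
def get_basic_type_alt (type_name : String) (types : List (String × List (String × String))) : String :=
  let nxt := altEdges types
  let name := (PySem.List.pyRange 0 (((PySem.Dict.ofList types).size : Int) + 1) 1).foldl
      (fun n _ => altStep nxt n) type_name
  PySem.Dict.getD pvBasicTypes name "BYTE_ARRAY {} (STRING)"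

-- ===== PRECONDITION & SPEC =====
-- Pre_: the alias chain starting at type_name reaches a terminal (empty name, a basic
-- type, or a name with no further truthy alias); a terminating chain never revisits a
-- key, so distinct-key-count + 1 fuel decides it. On a cyclic chain the Python A raises
-- RecursionError (returns nothing), so exactly those inputs are excluded.
def chainStops : Nat → String → List (String × List (String × String)) → Bool
  | 0, _, _ => false
  | fuel + 1, name, types =>
    if name = "" then true
    else
      match PySem.Dict.get? pvBasicTypes name with
      | some _ => true
      | none =>
        match PySem.Dict.get? (PySem.Dict.ofList (PySem.Dict.getD (PySem.Dict.ofList types) name [])) "type" with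
        | some t => if t ≠ "" then chainStops fuel t types else true
        | none => true

def Pre_get_basic_type (type_name : String) (types : List (String × List (String × String))) : Prop :=
  chainStops ((PySem.Dict.ofList types).size + 1) type_name types = true
instance (type_name : String) (types : List (String × List (String × String))) : Decidable (Pre_get_basic_type type_name types) := by unfold Pre_get_basic_type; infer_instance

def pvWitness_get_basic_type : String × (List (String × List (String × String))) :=
  ("email_t", [("email_t", [("type", "string_t")]), ("string_t", [("caption", "String")])])

def Spec_get_basic_type (type_name : String) (types : List (String × List (String × String))) (out : String) : Prop := out = get_basic_type_alt type_name types
instance (type_name : String) (types : List (String × List (String × String))) (out : String) : Decidable (Spec_get_basic_type type_name types out) := by unfold Spec_get_basic_type; infer_instance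

-- ===== CLAIM (what is proved, stated in full; the proofs are below) =====
def Claim_equal_get_basic_type : Prop := ∀ (type_name : String) (types : List (String × List (String × String))), Dom_get_basic_type type_name types → Pre_get_basic_type type_name types → Spec_get_basic_type type_name types (get_basic_type type_name types)

-- ===== LEMMAS AND PROOFS =====

-- A fold that ignores the list elements is an iterate of its step.
theorem foldl_const_iterate {α β : Type} (f : α → α) :
    ∀ (l : List β) (x : α), l.foldl (fun a _ => f a) x = f^[l.length] x := by
  intro l
  induction l with
  | nil => intro x; rfl
  | cons b l ih =>
    intro x
    simp only [List.foldl_cons, List.length_cons, ih, Function.iterate_succ_apply]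

-- Keys survive the filterMap of altEdges as a sublist, so they stay Nodup.
theorem filterMap_keys_sublist (l : List (String × List (String × String))) :
    ((l.filterMap (fun kv => match PySem.Dict.get? (PySem.Dict.ofList kv.2) "type" with
        | some t => if t = "" then none else some (kv.1, t)
        | none => none)).map Prod.fst).Sublist (l.map Prod.fst) := by
  induction l with
  | nil => simp
  | cons kv l ih =>
    simp only [List.filterMap_cons, List.map_cons]
    cases h : PySem.Dict.get? (PySem.Dict.ofList kv.2) "type" with
    | none => exact ih.cons _
    | some t =>
      by_cases ht : t = ""
      · simp only [ht, if_true]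
        exact ih.cons _
      · simp only [if_neg ht, List.map_cons]
        exact ih.cons₂ _

-- A dict built from a Nodup-keyed pair list has exactly that items list.
theorem ofList_items_of_nodup {ν : Type} (l : List (String × ν)) (h : (l.map Prod.fst).Nodup) :
    (PySem.Dict.ofList l).items = l := by
  have := PySem.Dict.items_foldl_insert_fresh l Prod.fst Prod.snd
      (PySem.Dict.empty : PySem.Dict String ν)
      (fun a _ => PySem.Dict.contains_empty a.1) h
  simpa [PySem.Dict.ofList, PySem.Dict.update] using this

-- The single lookup Source B's loop performs, characterised by A's two-stage lookup.
theorem edge_get? (types : List (String × List (String × String))) (name : String) :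
    PySem.Dict.get? (altEdges types) name =
      match PySem.Dict.get? (PySem.Dict.ofList (PySem.Dict.getD (PySem.Dict.ofList types) name [])) "type" with
      | some t => if t = "" then none else some t
      | none => none := by
  have hnd : ((PySem.Dict.ofList types).items.map Prod.fst).Nodup :=
    PySem.Dict.nodup_keys_ofList types
  have hMnd := (filterMap_keys_sublist (PySem.Dict.ofList types).items).nodup hnd
  have hitems := ofList_items_of_nodup _ hMnd
  -- membership in the comprehension's items comes from a schema entry at the same key
  have hfrom : ∀ p ∈ (altEdges types).items, ∃ kv ∈ (PySem.Dict.ofList types).items,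
      kv.1 = p.1 ∧ (match PySem.Dict.get? (PySem.Dict.ofList kv.2) "type" with
        | some t => if t = "" then none else some (kv.1, t)
        | none => none) = some p := by
    intro p hp
    rw [show (altEdges types).items = _ from hitems] at hp
    obtain ⟨kv, hkv, hg⟩ := List.mem_filterMap.mp hp
    refine ⟨kv, hkv, ?_, hg⟩
    cases hin : PySem.Dict.get? (PySem.Dict.ofList kv.2) "type" with
    | none => rw [hin] at hg; cases hg
    | some t =>
      rw [hin] at hg
      by_cases ht : t = ""
      · simp [ht] at hg
      · simp only [if_neg ht, Option.some.injEq] at hg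
        rw [← hg]
  have hnone_of : (¬ ∃ t, (name, t) ∈ (altEdges types).items) →
      PySem.Dict.get? (altEdges types) name = none := by
    intro hno
    rw [PySem.Dict.get?_eq_none_iff_not_mem_keys]
    intro hmem
    have : ∃ p ∈ (altEdges types).items, p.1 = name := by
      simpa [PySem.Dict.keys, hitems, altEdges] using hmem
    obtain ⟨p, hp, hp1⟩ := this
    exact hno ⟨p.2, by rw [← hp1]; exact hp⟩
  cases h : PySem.Dict.get? (PySem.Dict.ofList types) name with
  | none =>
    have hinfo : PySem.Dict.getD (PySem.Dict.ofList types) name [] = [] := by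
      rw [PySem.Dict.getD_eq_get?_getD, h]; rfl
    rw [hinfo]
    have : PySem.Dict.get? (PySem.Dict.ofList ([] : List (String × String))) "type" = none := rfl
    rw [this]
    apply hnone_of
    rintro ⟨t, ht⟩
    obtain ⟨kv, hkv, hk1, -⟩ := hfrom _ ht
    have : PySem.Dict.get? (PySem.Dict.ofList types) kv.1 = some kv.2 := by
      obtain ⟨k1, k2⟩ := kv
      exact PySem.Dict.get?_of_mem_items _ hkv (PySem.Dict.nodup_keys_ofList types)
    rw [hk1] at this
    rw [h] at this
    cases this
  | some info =>
    have hinfo : PySem.Dict.getD (PySem.Dict.ofList types) name [] = info := by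
      rw [PySem.Dict.getD_eq_get?_getD, h]; rfl
    rw [hinfo]
    have huniq : ∀ kv ∈ (PySem.Dict.ofList types).items, kv.1 = name → kv.2 = info := by
      intro kv hkv hk1
      have h2 : PySem.Dict.get? (PySem.Dict.ofList types) kv.1 = some kv.2 := by
        obtain ⟨k1, k2⟩ := kv
        exact PySem.Dict.get?_of_mem_items _ hkv (PySem.Dict.nodup_keys_ofList types)
      rw [hk1, h] at h2
      exact (Option.some.injEq _ _ ▸ h2).symm
    cases hin : PySem.Dict.get? (PySem.Dict.ofList info) "type" with
    | none =>
      apply hnone_of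
      rintro ⟨t, ht⟩
      obtain ⟨kv, hkv, hk1, hg⟩ := hfrom _ ht
      rw [huniq kv hkv hk1] at hg
      rw [hin] at hg
      cases hg
    | some t =>
      by_cases ht : t = ""
      · simp only [ht, if_true]
        apply hnone_of
        rintro ⟨t', ht'⟩
        obtain ⟨kv, hkv, hk1, hg⟩ := hfrom _ ht'
        rw [huniq kv hkv hk1] at hg
        rw [hin] at hg
        simp [ht] at hg
      · simp only [if_neg ht]
        have hmemM : (name, t) ∈ (altEdges types).items := by
          rw [show (altEdges types).items = _ from hitems]
          apply List.mem_filterMap.mpr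
          refine ⟨(name, info), PySem.Dict.mem_items_of_get?_eq_some _ h, ?_⟩
          simp only [hin, if_neg ht]
        exact PySem.Dict.get?_of_mem_items _ hmemM (by simpa [PySem.Dict.keys, hitems, altEdges] using hMnd)

theorem size_ofList_le (types : List (String × List (String × String))) :
    (PySem.Dict.ofList types).size ≤ types.length := by
  suffices h : ∀ (l : List (String × List (String × String))) (d : PySem.Dict String (List (String × String))),
      (l.foldl (fun acc p => acc.insert p.1 p.2) d).size ≤ d.size + l.length by
    have := h types PySem.Dict.empty
    simpa [PySem.Dict.ofList, PySem.Dict.update, PySem.Dict.size_empty] using this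
  intro l
  induction l with
  | nil => intro d; simp
  | cons p l ih =>
    intro d
    have h1 := ih (d.insert p.1 p.2)
    have h2 : (d.insert p.1 p.2).size ≤ d.size + 1 := by
      rw [PySem.Dict.size_insert]; split_ifs <;> omega
    simp only [List.foldl_cons, List.length_cons]
    omega

-- Core invariant: once the chain stops within fuel f, A's recursive render at any fuel
-- f' ≥ f equals the defaulted table lookup of the m-fold iterated step, for any m ≥ f - 1.
theorem fuel_agree :
    ∀ (f f' m : Nat) (name : String) (types : List (String × List (String × String))),
      chainStops f name types = true → f ≤ f' → f ≤ m + 1 →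
      getBasicTypeFuel f' name types
        = PySem.Dict.getD pvBasicTypes ((altStep (altEdges types))^[m] name) "BYTE_ARRAY {} (STRING)" := by
  intro f
  induction f with
  | zero => intro f' m name types h _ _; simp [chainStops] at h
  | succ f ih =>
    intro f' m name types h hf' hm
    cases f' with
    | zero => omega
    | succ fs' =>
      by_cases hname : name = ""
      · subst hname
        rw [Function.iterate_fixed (by simp [altStep]) m]
        simp [getBasicTypeFuel]
        decide
      · simp only [chainStops, if_neg hname] at h
        simp only [getBasicTypeFuel, if_neg hname]
        cases hb : PySem.Dict.get? pvBasicTypes name with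
        | some v =>
          have hfix : altStep (altEdges types) name = name := by
            simp [altStep, PySem.Dict.contains_eq_isSome_get?, hb]
          rw [Function.iterate_fixed hfix m]
          rw [PySem.Dict.getD_eq_get?_getD pvBasicTypes name, hb]
          rfl
        | none =>
          simp only [hb] at h ⊢
          have hcond : (name = "" || PySem.Dict.contains pvBasicTypes name) = false := by
            simp [hname, PySem.Dict.contains_eq_isSome_get?, hb]
          cases ha : PySem.Dict.get? (PySem.Dict.ofList (PySem.Dict.getD (PySem.Dict.ofList types) name [])) "type" with
          | none =>
            have hfix : altStep (altEdges types) name = name := by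
              unfold altStep
              simp only [hcond, Bool.false_eq_true, if_false]
              rw [PySem.Dict.getD_eq_get?_getD (altEdges types) name, edge_get?, ha]
              rfl
            rw [Function.iterate_fixed hfix m]
            rw [PySem.Dict.getD_eq_get?_getD pvBasicTypes name, hb]
            rfl
          | some t =>
            simp only [ha] at h ⊢
            by_cases ht : t = ""
            · simp only [ht, ne_eq, not_true_eq_false, if_false] at h ⊢
              have hfix : altStep (altEdges types) name = name := by
                unfold altStep
                simp only [hcond, Bool.false_eq_true, if_false]
                rw [PySem.Dict.getD_eq_get?_getD (altEdges types) name, edge_get?, ha]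
                simp [ht]
              rw [Function.iterate_fixed hfix m]
              rw [PySem.Dict.getD_eq_get?_getD pvBasicTypes name, hb]
              rfl
            · simp only [ne_eq, ht, not_false_iff, if_true] at h ⊢
              have hfz : f ≠ 0 := by
                intro h0; rw [h0] at h; simp [chainStops] at h
              cases m with
              | zero => omega
              | succ m' =>
                have hstep : altStep (altEdges types) name = t := by
                  unfold altStep
                  simp only [hcond, Bool.false_eq_true, if_false]
                  rw [PySem.Dict.getD_eq_get?_getD (altEdges types) name, edge_get?, ha]
                  simp [ht]
                rw [Function.iterate_succ_apply, hstep]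
                exact ih fs' m' t types h (by omega) (by omega)

-- ===== VERDICT (by name: the statement is the Claim_ definition above) =====
theorem get_basic_type_spec : Claim_equal_get_basic_type := by
  intro type_name types _ hpre
  unfold Spec_get_basic_type get_basic_type
  show getBasicTypeFuel (types.length + 1) type_name types
    = PySem.Dict.getD pvBasicTypes
        ((PySem.List.pyRange 0 (((PySem.Dict.ofList types).size : Int) + 1) 1).foldl
          (fun n _ => altStep (altEdges types) n) type_name) "BYTE_ARRAY {} (STRING)"
  rw [foldl_const_iterate (altStep (altEdges types))]
  rw [PySem.List.length_pyRange_one]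
  have hs := size_ofList_le types
  have := fuel_agree ((PySem.Dict.ofList types).size + 1) (types.length + 1)
      (((PySem.Dict.ofList types).size : Int) + 1 - 0).toNat type_name types hpre (by omega) (by omega)
  simpa using this
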